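-- pv_equiv track=rewrite | github.com/goddl717/thisiscote | 연습문제/10.py | check
-- ===== SOURCE A (Python) =====
-- def part(key,arr,sy,sx):
--     M = len(key)
--     N = len(arr) - 2*M
--     answer = True
--
--     for i in range (M) :
--         for j in range(M) :
--             arr[i+sy][j+sx] += key[i][j]
--
--     for i in range(M,N+M) :
--         for j in range(M,M+N):
--             if arr[i][j] != 1:
--                 answer = False
--
--     for i in range (M) :
--         for j in range(M) :
--             arr[i+sy][j+sx] -= key[i][j]
--
--
--     return answer
--
-- def check(key,arr) :
--     M = len(key)
--     N = len(arr) - 2*M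
--     # M만큼 움직이면서 arr를 갱신 시킨다. 그리고 중간값에서 확인을 한다.
--     # 확인을 해서 중간이 모두 1이면 True 를 리턴 아니면 false 를 리턴 한다.
--     for i in range(0,N+M) :
--         for j in range(0,M+N):
--             if part(key,arr,i,j) == True :
--                 return True
--
--
--     return False
-- ===== SOURCE B (Python) =====
-- def check(key, arr):
--     M = len(key)
--     N = len(arr) - 2 * M
--     center = [(r, c) for r in range(M, M + N) for c in range(M, M + N)]
--     bad = [(r, c) for (r, c) in center if arr[r][c] != 1]
--     for sy in range(N + M):
--         for sx in range(M + N):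
--             if all(sy <= r < sy + M and sx <= c < sx + M
--                    and arr[r][c] + key[r - sy][c - sx] == 1 for (r, c) in bad) \
--                and all(arr[r][c] + key[r - sy][c - sx] == 1
--                        for r in range(max(M, sy), min(M + N, sy + M))
--                        for c in range(max(M, sx), min(M + N, sx + M))):
--                 return True
--     return False
-- ===== Notes on version B (the rewrite author's own statement) =====
-- stated objective: alternative
-- what changed: Instead of mutating the grid (add key, rescan the whole centre, subtract) for every placement, B precomputes once the list of centre cells that are not 1 and, per placement, only checks that every such bad cell lies in the key window with sum 1 and that every key/centre-overlap cell sums to 1, with short-circuiting; no mutation at all.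
import Mathlib
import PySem

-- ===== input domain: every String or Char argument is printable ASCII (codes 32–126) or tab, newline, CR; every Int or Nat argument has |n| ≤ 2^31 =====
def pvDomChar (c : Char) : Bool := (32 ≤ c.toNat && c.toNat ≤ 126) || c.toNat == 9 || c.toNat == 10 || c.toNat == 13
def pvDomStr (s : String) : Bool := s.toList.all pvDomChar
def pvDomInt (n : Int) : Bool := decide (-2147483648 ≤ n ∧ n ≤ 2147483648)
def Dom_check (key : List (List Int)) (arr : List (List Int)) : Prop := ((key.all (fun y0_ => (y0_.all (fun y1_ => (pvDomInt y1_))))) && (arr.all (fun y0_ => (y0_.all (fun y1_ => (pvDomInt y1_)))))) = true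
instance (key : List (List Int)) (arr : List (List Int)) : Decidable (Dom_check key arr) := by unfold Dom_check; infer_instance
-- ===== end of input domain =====

-- B replaces A's mutate/rescan/restore per placement by a precomputed bad-cell list plus an
-- overlap-only short-circuit scan (a different algorithm of similar cost); A restores arr before
-- returning, so callers observe no mutation and the return-value equivalence is the whole behaviour.


-- ===== PORT A =====
-- in-range Python indexing a[r][c] (Pre_check keeps every access of either port in range)
def pvAget (a : List (List Int)) (r c : Nat) : Int := (a.getD r []).getD c 0

-- the Python statement  a[p][q] += v
def pvAddAt (a : List (List Int)) (p q : Nat) (v : Int) : List (List Int) :=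
  a.set p ((a.getD p []).set q ((a.getD p []).getD q 0 + v))

-- Python `part`: add the key into arr, scan the whole centre; the Python's final loop subtracts the
-- key back, restoring arr exactly, so it does not affect the returned value (dropped in this
-- functional port, which threads the updated grid explicitly instead of mutating).
def pvPart (key arr : List (List Int)) (sy sx : Nat) : Bool :=
  let M := key.length
  let n := ((arr.length : Int) - 2 * (M : Int)).toNat    -- N = len(arr) - 2*M; toNat matches Python's empty range when N < 0
  let arr1 := (List.range M).foldl (fun a i => (List.range M).foldl (fun a j =>
      pvAddAt a (i + sy) (j + sx) (pvAget key i j)) a) arr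
  (List.range' M n).foldl (fun ans i => (List.range' M n).foldl (fun ans j =>
      if pvAget arr1 i j ≠ 1 then false else ans) ans) true

def check (key : List (List Int)) (arr : List (List Int)) : Bool :=
  let t := ((arr.length : Int) - (key.length : Int)).toNat   -- both loops run N+M = len(arr)-M times
  (List.range t).any fun sy => (List.range t).any fun sx => pvPart key arr sy sx

-- ===== PORT B =====
def check_alt (key : List (List Int)) (arr : List (List Int)) : Bool :=
  let M := key.length
  let n := ((arr.length : Int) - 2 * (M : Int)).toNat
  let center := (List.range' M n).flatMap (fun r => (List.range' M n).map (fun c => (r, c)))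
  let bad := center.filter (fun p => pvAget arr p.1 p.2 ≠ 1)
  let t := ((arr.length : Int) - (M : Int)).toNat
  (List.range t).any fun sy => (List.range t).any fun sx =>
    (bad.all fun p => decide (sy ≤ p.1 ∧ p.1 < sy + M ∧ sx ≤ p.2 ∧ p.2 < sx + M) &&
        (pvAget arr p.1 p.2 + pvAget key (p.1 - sy) (p.2 - sx) == 1)) &&
    ((List.range' (max M sy) (min (M + n) (sy + M) - max M sy)).all fun r =>
     (List.range' (max M sx) (min (M + n) (sx + M) - max M sx)).all fun c =>
       pvAget arr r c + pvAget key (r - sy) (c - sx) == 1)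

-- ===== PRECONDITION & SPEC =====
-- Pre_ admits every input whose accesses stay in range over ALL placements (then A cannot raise):
-- no placement at all (len(arr) ≤ len(key)), or full-width key rows, rows 0..len(arr)-2 at least
-- len(arr)-1 wide (the add loop's band) and centre rows at least len(arr)-len(key) wide; it excludes
-- the inputs where A raises IndexError on ragged rows, and the rare ragged inputs where A happens to
-- return True early before first touching a too-short row.
def Pre_check (key : List (List Int)) (arr : List (List Int)) : Prop :=
  arr.length ≤ key.length ∨
  ((∀ row ∈ key, key.length ≤ row.length) ∧
   (∀ r ∈ List.range arr.length,
      (r + 1 < arr.length → arr.length ≤ (arr.getD r []).length + 1) ∧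
      (key.length ≤ r → r + key.length < arr.length →
        arr.length ≤ (arr.getD r []).length + key.length)))
instance (key : List (List Int)) (arr : List (List Int)) : Decidable (Pre_check key arr) := by unfold Pre_check; infer_instance

def pvWitness_check : List (List Int) × List (List Int) :=
  ([[0]], [[1, 1, 1], [1, 1, 1], [1, 1, 1]])

def Spec_check (key : List (List Int)) (arr : List (List Int)) (out : Bool) : Prop := out = check_alt key arr
instance (key : List (List Int)) (arr : List (List Int)) (out : Bool) : Decidable (Spec_check key arr out) := by unfold Spec_check; infer_instance

-- ===== CLAIM (what is proved, stated in full; the proofs are below) =====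
def Claim_equal_check : Prop := ∀ (key : List (List Int)) (arr : List (List Int)), Dom_check key arr → Pre_check key arr → Spec_check key arr (check key arr)

-- ===== LEMMAS AND PROOFS =====

-- the value the overlaid grid holds at (r, c) for placement (sy, sx)
def pvVal (key arr : List (List Int)) (sy sx r c : Nat) : Int :=
  pvAget arr r c +
    (if sy ≤ r ∧ r < sy + key.length ∧ sx ≤ c ∧ c < sx + key.length
     then pvAget key (r - sy) (c - sx) else 0)

theorem pvAddAt_length (a : List (List Int)) (p q : Nat) (v : Int) :
    (pvAddAt a p q v).length = a.length := by
  simp [pvAddAt]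

theorem pvGetD_set {α : Type} (a : List α) (p r : Nat) (x d : α) :
    (a.set p x).getD r d = if r = p ∧ p < a.length then x else a.getD r d := by
  rw [List.getD_eq_getElem?_getD, List.getD_eq_getElem?_getD, List.getElem?_set]
  split_ifs with h1 h2 h3 <;> simp_all

theorem pvAddAt_rowlen (a : List (List Int)) (p q : Nat) (v : Int) (r : Nat) :
    ((pvAddAt a p q v).getD r []).length = (a.getD r []).length := by
  unfold pvAddAt
  rw [pvGetD_set]
  split_ifs with h
  · rcases h with ⟨h1, _⟩; subst h1; simp
  · rfl

theorem pvAddAt_get (a : List (List Int)) (p q : Nat) (v : Int) (r c : Nat)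
    (hp : p < a.length) (hq : q < (a.getD p []).length) :
    pvAget (pvAddAt a p q v) r c = pvAget a r c + (if r = p ∧ c = q then v else 0) := by
  unfold pvAget pvAddAt
  rw [pvGetD_set]
  split_ifs with h1 h2 h3
  · rw [pvGetD_set]
    split_ifs with h4
    · rcases h2 with ⟨rfl, rfl⟩; rfl
    · exact absurd ⟨h2.2, hq⟩ h4
  · rw [pvGetD_set]
    split_ifs with h4
    · exact absurd ⟨h1.1, h4.1⟩ h2
    · rcases h1 with ⟨rfl, -⟩; simp
  · exact absurd ⟨h3.1, hp⟩ h1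
  · simp

-- column fold of the add loop for a fixed row i
def pvColF (key : List (List Int)) (sy sx i : Nat) (m : Nat) (a : List (List Int)) : List (List Int) :=
  (List.range m).foldl (fun a j => pvAddAt a (i + sy) (j + sx) (pvAget key i j)) a

theorem pvColF_succ (key : List (List Int)) (sy sx i m : Nat) (a : List (List Int)) :
    pvColF key sy sx i (m + 1) a =
      pvAddAt (pvColF key sy sx i m a) (i + sy) (m + sx) (pvAget key i m) := by
  unfold pvColF
  rw [List.range_succ, List.foldl_append]
  rfl

theorem pvColF_length (key sy sx i m a) : (pvColF key sy sx i m a).length = a.length := by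
  induction m with
  | zero => rfl
  | succ m ih => rw [pvColF_succ, pvAddAt_length, ih]

theorem pvColF_rowlen (key sy sx i m a r) :
    ((pvColF key sy sx i m a).getD r []).length = (a.getD r []).length := by
  induction m with
  | zero => rfl
  | succ m ih => rw [pvColF_succ, pvAddAt_rowlen, ih]

theorem pvColF_get (key : List (List Int)) (sy sx i : Nat) (m : Nat) (a : List (List Int)) (r c : Nat)
    (hp : i + sy < a.length) (hq : ∀ j < m, j + sx < (a.getD (i + sy) []).length) :
    pvAget (pvColF key sy sx i m a) r c =
      pvAget a r c + (if r = i + sy ∧ sx ≤ c ∧ c < sx + m then pvAget key i (c - sx) else 0) := by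
  induction m with
  | zero =>
    have h : ¬(r = i + sy ∧ sx ≤ c ∧ c < sx + 0) := by omega
    rw [show pvColF key sy sx i 0 a = a from rfl, if_neg h, add_zero]
  | succ m ih =>
    rw [pvColF_succ,
      pvAddAt_get _ _ _ _ _ _ (by rw [pvColF_length]; exact hp)
        (by rw [pvColF_rowlen]; exact hq m (Nat.lt_succ_self m)),
      ih (fun j hj => hq j (Nat.lt_succ_of_lt hj))]
    by_cases h1 : r = i + sy ∧ c = m + sx
    · have hc : c - sx = m := by omega
      have h2 : ¬(r = i + sy ∧ sx ≤ c ∧ c < sx + m) := by omega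
      have h3 : r = i + sy ∧ sx ≤ c ∧ c < sx + (m + 1) := by omega
      rcases h1 with ⟨rfl, rfl⟩
      simp [h3, hc, show ¬(m + sx < sx + m) from by omega]
    · by_cases hr : r = i + sy
      · have hcq : c ≠ m + sx := fun hc => h1 ⟨hr, hc⟩
        have hiff : (r = i + sy ∧ sx ≤ c ∧ c < sx + m) ↔ (r = i + sy ∧ sx ≤ c ∧ c < sx + (m + 1)) := by
          constructor <;> (rintro ⟨hh1, hh2, hh3⟩; exact ⟨hh1, hh2, by omega⟩)
        simp [h1, hiff]
      · have h2 : ¬(r = i + sy ∧ sx ≤ c ∧ c < sx + m) := fun hh => hr hh.1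
        have h3 : ¬(r = i + sy ∧ sx ≤ c ∧ c < sx + (m + 1)) := fun hh => hr hh.1
        simp [h1, h2, h3]

-- row fold = the whole add loop
def pvRowF (key : List (List Int)) (sy sx : Nat) (m : Nat) (a : List (List Int)) : List (List Int) :=
  (List.range m).foldl (fun a i => pvColF key sy sx i key.length a) a

theorem pvRowF_succ (key : List (List Int)) (sy sx m : Nat) (a : List (List Int)) :
    pvRowF key sy sx (m + 1) a = pvColF key sy sx m key.length (pvRowF key sy sx m a) := by
  unfold pvRowF
  rw [List.range_succ, List.foldl_append]
  rfl

theorem pvRowF_length (key sy sx m a) : (pvRowF key sy sx m a).length = a.length := by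
  induction m with
  | zero => rfl
  | succ m ih => rw [pvRowF_succ, pvColF_length, ih]

theorem pvRowF_rowlen (key sy sx m a r) :
    ((pvRowF key sy sx m a).getD r []).length = (a.getD r []).length := by
  induction m with
  | zero => rfl
  | succ m ih => rw [pvRowF_succ, pvColF_rowlen, ih]

theorem pvRowF_get (key arr : List (List Int)) (sy sx : Nat) (m : Nat) (r c : Nat)
    (hm : m ≤ key.length)
    (hp : ∀ i < m, i + sy < arr.length)
    (hq : ∀ i < m, ∀ j < key.length, j + sx < (arr.getD (i + sy) []).length) :
    pvAget (pvRowF key sy sx m arr) r c =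
      pvAget arr r c +
        (if sy ≤ r ∧ r < sy + m ∧ sx ≤ c ∧ c < sx + key.length
         then pvAget key (r - sy) (c - sx) else 0) := by
  induction m with
  | zero =>
    have h : ¬(sy ≤ r ∧ r < sy + 0 ∧ sx ≤ c ∧ c < sx + key.length) := by omega
    rw [show pvRowF key sy sx 0 arr = arr from rfl, if_neg h, add_zero]
  | succ m ih =>
    rw [pvRowF_succ,
      pvColF_get key sy sx m key.length _ r c
        (by rw [pvRowF_length]; exact hp m (Nat.lt_succ_self m))
        (fun j hj => by rw [pvRowF_rowlen]; exact hq m (Nat.lt_succ_self m) j hj),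
      ih (by omega) (fun i hi => hp i (by omega)) (fun i hi => hq i (by omega))]
    by_cases h1 : r = m + sy ∧ sx ≤ c ∧ c < sx + key.length
    · have hr : r - sy = m := by omega
      have h2 : ¬(sy ≤ r ∧ r < sy + m ∧ sx ≤ c ∧ c < sx + key.length) := by omega
      have h3 : sy ≤ r ∧ r < sy + (m + 1) ∧ sx ≤ c ∧ c < sx + key.length := by omega
      simp [h1, show ¬(m + sy < sy + m) from by omega,
        show m + sy < sy + (m + 1) from by omega]
    · by_cases h2 : sy ≤ r ∧ r < sy + m ∧ sx ≤ c ∧ c < sx + key.length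
      · have h3 : sy ≤ r ∧ r < sy + (m + 1) ∧ sx ≤ c ∧ c < sx + key.length := by omega
        have hne : r ≠ m + sy := by omega
        simp [hne, h2, h3]
      · have h3 : ¬(sy ≤ r ∧ r < sy + (m + 1) ∧ sx ≤ c ∧ c < sx + key.length) := by omega
        simp [h1, h2, h3]

theorem pvFoldl_flag {α : Type} (P : α → Prop) [DecidablePred P] (l : List α) (b : Bool) :
    l.foldl (fun ans i => if P i then false else ans) b = (b && l.all (fun i => !decide (P i))) := by
  induction l generalizing b with
  | nil => simp
  | cons x l ih =>
    simp only [List.foldl_cons, List.all_cons, ih]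
    by_cases h : P x <;> cases b <;> simp [h]

theorem pvFoldl_and {α : Type} (g : α → Bool) (l : List α) (b : Bool) :
    l.foldl (fun ans i => ans && g i) b = (b && l.all g) := by
  induction l generalizing b with
  | nil => simp
  | cons x l ih =>
    simp only [List.foldl_cons, List.all_cons, ih]
    cases g x <;> cases b <;> simp

theorem pvAll_congr {α : Type} {l : List α} {f g : α → Bool} (h : ∀ x ∈ l, f x = g x) :
    l.all f = l.all g := by
  induction l with
  | nil => rfl
  | cons x l ih =>
    simp only [List.all_cons, h x (List.mem_cons_self), ih (fun y hy => h y (List.mem_cons_of_mem x hy))]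

-- "every centre cell of the overlaid grid is 1", the common pointwise characterisation
def pvCenterAll (key arr : List (List Int)) (sy sx : Nat) : Bool :=
  (List.range' key.length ((arr.length : Int) - 2 * (key.length : Int)).toNat).all fun r =>
  (List.range' key.length ((arr.length : Int) - 2 * (key.length : Int)).toNat).all fun c =>
    (pvVal key arr sy sx r c == 1)

-- B's per-placement test (the body of check_alt's inner lambda)
def pvAltPlace (key arr : List (List Int)) (sy sx : Nat) : Bool :=
  ((((List.range' key.length ((arr.length : Int) - 2 * (key.length : Int)).toNat).flatMap
      (fun r => (List.range' key.length ((arr.length : Int) - 2 * (key.length : Int)).toNat).map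
        (fun c => (r, c)))).filter
        (fun p => pvAget arr p.1 p.2 ≠ 1)).all fun p =>
      decide (sy ≤ p.1 ∧ p.1 < sy + key.length ∧ sx ≤ p.2 ∧ p.2 < sx + key.length) &&
      (pvAget arr p.1 p.2 + pvAget key (p.1 - sy) (p.2 - sx) == 1)) &&
  ((List.range' (max key.length sy)
      (min (key.length + ((arr.length : Int) - 2 * (key.length : Int)).toNat) (sy + key.length) - max key.length sy)).all fun r =>
   (List.range' (max key.length sx)
      (min (key.length + ((arr.length : Int) - 2 * (key.length : Int)).toNat) (sx + key.length) - max key.length sx)).all fun c =>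
     pvAget arr r c + pvAget key (r - sy) (c - sx) == 1)

-- A's per-placement test, characterised pointwise
theorem pvPart_eq (key arr : List (List Int)) (sy sx : Nat)
    (hpre : Pre_check key arr)
    (hsy : (sy : Int) < (arr.length : Int) - (key.length : Int))
    (hsx : (sx : Int) < (arr.length : Int) - (key.length : Int)) :
    pvPart key arr sy sx = pvCenterAll key arr sy sx := by
  unfold pvCenterAll
  have hL : sy + key.length < arr.length := by omega
  rcases hpre with hpre | hpre
  · omega
  have hq : ∀ i < key.length, ∀ j < key.length, j + sx < (arr.getD (i + sy) []).length := by
    intro i hi j hj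
    have hlt : i + sy < arr.length := by omega
    have := (hpre.2 (i + sy) (List.mem_range.mpr hlt)).1 (by omega)
    omega
  simp only [pvPart]
  rw [show (List.range key.length).foldl (fun a i => (List.range key.length).foldl
      (fun a j => pvAddAt a (i + sy) (j + sx) (pvAget key i j)) a) arr
      = pvRowF key sy sx key.length arr from rfl]
  refine Eq.trans (PySem.List.foldl_congr_mem (g := fun ans i =>
      ans && (List.range' key.length ((arr.length : Int) - 2 * (key.length : Int)).toNat).all
        (fun j => !decide (pvAget (pvRowF key sy sx key.length arr) i j ≠ 1)))
      _ _ _ (fun acc x _ => pvFoldl_flag _ _ acc)) ?_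
  rw [pvFoldl_and, Bool.true_and]
  apply pvAll_congr
  intro r _
  apply pvAll_congr
  intro c _
  rw [pvRowF_get key arr sy sx key.length r c le_rfl (fun i hi => by omega) hq]
  show (!decide (pvVal key arr sy sx r c ≠ 1)) = (pvVal key arr sy sx r c == 1)
  cases hdec : decide (pvVal key arr sy sx r c = 1) <;> simp_all

-- B's per-placement test equals the same pointwise condition
theorem pvAlt_eq (key arr : List (List Int)) (sy sx : Nat) :
    pvAltPlace key arr sy sx = pvCenterAll key arr sy sx := by
  unfold pvAltPlace pvCenterAll
  rw [Bool.eq_iff_iff]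
  simp only [Bool.and_eq_true, List.all_eq_true, List.mem_filter, List.mem_flatMap,
    List.mem_map, List.mem_range'_1, decide_eq_true_eq, beq_iff_eq, ne_eq, Prod.forall,
    Prod.mk.injEq]
  constructor
  · rintro ⟨hbad, hov⟩ r ⟨hr1, hr2⟩ c ⟨hc1, hc2⟩
    unfold pvVal
    split_ifs with hw
    · exact hov r ⟨by omega, by omega⟩ c ⟨by omega, by omega⟩
    · by_cases hb : pvAget arr r c = 1
      · rw [add_zero]; exact hb
      · have h := hbad r c ⟨⟨r, ⟨hr1, hr2⟩, c, ⟨hc1, hc2⟩, rfl, rfl⟩, hb⟩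
        exact absurd h.1 (by omega)
  · intro h
    constructor
    · rintro a b ⟨⟨r, hr, c, hc, rfl, rfl⟩, hb⟩
      by_cases hw : sy ≤ r ∧ r < sy + key.length ∧ sx ≤ c ∧ c < sx + key.length
      · refine ⟨hw, ?_⟩
        have hv := h r hr c hc
        unfold pvVal at hv
        rw [if_pos hw] at hv
        exact hv
      · have hv := h r hr c hc
        unfold pvVal at hv
        rw [if_neg hw, add_zero] at hv
        exact absurd hv hb
    · rintro r ⟨hr1, hr2⟩ c ⟨hc1, hc2⟩
      have hv := h r ⟨by omega, by omega⟩ c ⟨by omega, by omega⟩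
      unfold pvVal at hv
      rw [if_pos ⟨by omega, by omega, by omega, by omega⟩] at hv
      exact hv

-- ===== VERDICT (by name: the statement is the Claim_ definition above) =====
theorem check_spec : Claim_equal_check := by
  intro key arr _ hpre
  unfold Spec_check
  have h1 : check key arr = (List.range ((arr.length : Int) - (key.length : Int)).toNat).any
      (fun sy => (List.range ((arr.length : Int) - (key.length : Int)).toNat).any
        fun sx => pvPart key arr sy sx) := rfl
  have h2 : check_alt key arr = (List.range ((arr.length : Int) - (key.length : Int)).toNat).any
      (fun sy => (List.range ((arr.length : Int) - (key.length : Int)).toNat).any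
        fun sx => pvAltPlace key arr sy sx) := rfl
  rw [h1, h2, Bool.eq_iff_iff]
  simp only [List.any_eq_true, List.mem_range]
  constructor
  · rintro ⟨sy, hsy, sx, hsx, hp⟩
    refine ⟨sy, hsy, sx, hsx, ?_⟩
    rw [pvPart_eq key arr sy sx hpre (Int.lt_toNat.mp hsy) (Int.lt_toNat.mp hsx)] at hp
    rw [pvAlt_eq]
    exact hp
  · rintro ⟨sy, hsy, sx, hsx, hp⟩
    refine ⟨sy, hsy, sx, hsx, ?_⟩
    rw [pvAlt_eq] at hp
    rw [pvPart_eq key arr sy sx hpre (Int.lt_toNat.mp hsy) (Int.lt_toNat.mp hsx)]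
    exact hp
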